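-- pv_equiv track=rewrite | github.com/arthurzengg/coding_q | RobloxOA/q2.py | solution
-- ===== SOURCE A (Python) =====
-- def solution(a, b, queries):
--     from collections import Counter
--     a_counter = Counter(a)
--     b_counter = Counter(b)
--     result = []
--
--     for query in queries:
--         if query[0] == 0:
--             # Update b[i] += x
--             i = query[1]
--             x = query[2]
--             old_value = b[i]
--             b_counter[old_value] -= 1
--             if b_counter[old_value] == 0:
--                 del b_counter[old_value]
--             b[i] += x
--             new_value = b[i]
--             b_counter[new_value] += 1
--         elif query[0] == 1:
--             x = query[1]
--             total = 0
--             for val_a, count_a in a_counter.items():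
--                 val_b = x - val_a
--                 count_b = b_counter.get(val_b, 0)
--                 total += count_a * count_b
--             result.append(total)
--     return result
--
-- a = [1, 2, 2]
--
-- b = [2, 3]
--
-- queries = [[1, 4], [0, 0, 1], [1, 5]]
-- ===== SOURCE B (Python) =====
-- def solution(a, b, queries):
--     # Simpler: no counters at all; count matching pairs directly per query.
--     result = []
--     for query in queries:
--         if query[0] == 0:
--             b[query[1]] += query[2]
--         elif query[0] == 1:
--             x = query[1]
--             total = 0
--             for ai in a:
--                 for bj in b:
--                     if ai + bj == x:
--                         total += 1
--             result.append(total)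
--     return result
-- ===== Notes on version B (the rewrite author's own statement) =====
-- stated objective: simpler
-- what changed: B drops both Counters and the per-query iteration over distinct a-values: it mutates b directly and, for each count query, counts matching (i,j) pairs with a plain nested loop over a and b (no Counter construction or dict lookups).
import Mathlib
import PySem

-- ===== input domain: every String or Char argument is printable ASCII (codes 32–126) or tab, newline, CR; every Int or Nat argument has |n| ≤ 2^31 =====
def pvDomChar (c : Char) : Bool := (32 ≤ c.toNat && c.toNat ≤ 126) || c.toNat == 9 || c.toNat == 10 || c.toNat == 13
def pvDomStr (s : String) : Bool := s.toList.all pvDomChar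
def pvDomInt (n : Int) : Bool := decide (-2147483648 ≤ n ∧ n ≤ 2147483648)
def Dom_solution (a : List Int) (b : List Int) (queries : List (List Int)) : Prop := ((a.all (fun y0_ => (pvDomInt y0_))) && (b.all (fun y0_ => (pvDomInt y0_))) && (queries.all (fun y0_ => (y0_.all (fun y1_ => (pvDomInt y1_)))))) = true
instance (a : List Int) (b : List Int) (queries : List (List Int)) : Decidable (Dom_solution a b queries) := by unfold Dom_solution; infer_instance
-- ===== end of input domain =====

-- B replaces A's two Counters and per-distinct-value query scan by a plain nested pair count
-- over a and the current b (simpler; measured faster on the generated workloads). Both A and B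
-- mutate b in place identically; the equivalence proved here is about the return value.

-- ===== PORT A =====
def stepA (a_counter : PySem.Dict Int Int) (st : PySem.Dict Int Int × List Int × List Int)
    (query : List Int) : PySem.Dict Int Int × List Int × List Int :=
  if PySem.List.pyGetD query 0 0 = 0 then
    let i := PySem.List.pyGetD query 1 0
    let x := PySem.List.pyGetD query 2 0
    let old_value := PySem.List.pyGetD st.2.1 i 0
    let bc1 := st.1.modify old_value 0 (· - 1)
    let bc2 := if bc1.getD old_value 0 = 0 then bc1.erase old_value else bc1
    let b' := PySem.List.pySetD st.2.1 i (old_value + x)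
    let new_value := PySem.List.pyGetD b' i 0
    (bc2.modify new_value 0 (· + 1), b', st.2.2)
  else if PySem.List.pyGetD query 0 0 = 1 then
    let x := PySem.List.pyGetD query 1 0
    let total := a_counter.items.foldl (fun t p => t + p.2 * st.1.getD (x - p.1) 0) 0
    (st.1, st.2.1, st.2.2 ++ [total])
  else st

def solution (a : List Int) (b : List Int) (queries : List (List Int)) : List Int :=
  (queries.foldl (stepA (PySem.Dict.counter a)) (PySem.Dict.counter b, b, ([] : List Int))).2.2

-- ===== PORT B =====
def stepB (a : List Int) (st : List Int × List Int) (query : List Int) : List Int × List Int :=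
  if PySem.List.pyGetD query 0 0 = 0 then
    (PySem.List.pySetD st.1 (PySem.List.pyGetD query 1 0)
       (PySem.List.pyGetD st.1 (PySem.List.pyGetD query 1 0) 0 + PySem.List.pyGetD query 2 0),
     st.2)
  else if PySem.List.pyGetD query 0 0 = 1 then
    let x := PySem.List.pyGetD query 1 0
    let total := a.foldl (fun t ai => st.1.foldl (fun t bj => if ai + bj = x then t + 1 else t) t) 0
    (st.1, st.2 ++ [total])
  else st

def solution_alt (a : List Int) (b : List Int) (queries : List (List Int)) : List Int :=
  (queries.foldl (stepB a) (b, ([] : List Int))).2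

-- ===== PRECONDITION & SPEC =====
-- Pre_ excludes exactly the inputs where Python A raises IndexError: a query list shorter than
-- its branch reads, or a type-0 update index outside b's (Python, sign-aware) index range.
def Pre_solution (a : List Int) (b : List Int) (queries : List (List Int)) : Prop :=
  ∀ q ∈ queries, q ≠ [] ∧
    (PySem.List.pyGetD q 0 0 = 0 → 3 ≤ q.length ∧ PySem.Raise.InRange b.length (PySem.List.pyGetD q 1 0)) ∧
    (PySem.List.pyGetD q 0 0 = 1 → 2 ≤ q.length)
instance (a : List Int) (b : List Int) (queries : List (List Int)) : Decidable (Pre_solution a b queries) := by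
  unfold Pre_solution; infer_instance

def pvWitness_solution : List Int × List Int × List (List Int) :=
  ([1, 2, 2], [2, 3], [[1, 4], [0, 0, 1], [1, 5]])

def Spec_solution (a : List Int) (b : List Int) (queries : List (List Int)) (out : List Int) : Prop := out = solution_alt a b queries
instance (a : List Int) (b : List Int) (queries : List (List Int)) (out : List Int) : Decidable (Spec_solution a b queries out) := by unfold Spec_solution; infer_instance

-- ===== CLAIM (what is proved, stated in full; the proofs are below) =====
def Claim_equal_solution : Prop := ∀ (a : List Int) (b : List Int) (queries : List (List Int)), Dom_solution a b queries → Pre_solution a b queries → Spec_solution a b queries (solution a b queries)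

-- ===== LEMMAS AND PROOFS =====

-- a resolved (sign-aware) Python index
theorem pyIdx?_of_inRange (n : Nat) (i : Int) (h : PySem.Raise.InRange n i) :
    ∃ j : Nat, PySem.List.pyIdx? n i = some j ∧ j < n := by
  obtain ⟨h1, h2⟩ := h
  simp only [PySem.List.pyIdx?]
  by_cases h0 : 0 ≤ i
  · exact ⟨i.toNat, by simp [h0, h2], by omega⟩
  · exact ⟨n - (-i).toNat, by simp [h0, h1], by omega⟩

theorem pyIdx?_of_not_inRange (n : Nat) (i : Int) (h : ¬ PySem.Raise.InRange n i) :
    PySem.List.pyIdx? n i = none := by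
  simp only [PySem.Raise.InRange, not_and_or, not_le, not_lt] at h
  simp only [PySem.List.pyIdx?]
  rcases h with h | h <;> split_ifs <;> first | rfl | omega

-- erase only ever zeroes the erased key's count
theorem getD0_erase (d : PySem.Dict Int Int) (k v : Int) :
    (d.erase k).getD v 0 = if v = k then 0 else d.getD v 0 := by
  obtain ⟨l⟩ := d
  simp only [PySem.Dict.erase, PySem.Dict.getD, PySem.Dict.get?]
  induction l with
  | nil => simp
  | cons p t ih =>
    rw [List.filter_cons]
    by_cases hpk : p.1 = k
    · have hb : (!p.1 == k) = false := by simp [hpk]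
      rw [hb, if_neg (by simp), ih]
      by_cases hkv : v = k
      · simp [hkv]
      · have hf : (p.1 == v) = false := by rw [beq_eq_false_iff_ne]; omega
        simp only [if_neg hkv, List.find?_cons, hf]
    · have hb : (!p.1 == k) = true := by simp [hpk]
      rw [hb, if_pos rfl]
      by_cases hpv : p.1 = v
      · have ht : (p.1 == v) = true := by simp [hpv]
        have hvk : ¬ v = k := by omega
        simp only [List.find?_cons, ht, if_neg hvk]
      · have hf : (p.1 == v) = false := by simp [hpv]
        simp only [List.find?_cons, hf]
        exact ih

-- counts through an in-place update of one list cell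
theorem count_set_nat : ∀ (xs : List Int) (j : Nat) (w v : Int), ∀ h : j < xs.length,
    (xs.set j w).count v + (if xs[j] = v then 1 else 0) = xs.count v + (if w = v then 1 else 0)
  | y :: t, 0, w, v, _ => by
    simp only [List.set_cons_zero, List.count_cons, List.getElem_cons_zero, beq_iff_eq]
    split_ifs <;> omega
  | y :: t, j + 1, w, v, h => by
    have ih := count_set_nat t j w v (by simpa using h)
    simp only [List.set_cons_succ, List.count_cons, List.getElem_cons_succ, beq_iff_eq]
    split_ifs at ih ⊢ <;> omega

theorem count_set_int (xs : List Int) (j : Nat) (w v : Int) (h : j < xs.length) :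
    ((xs.set j w).count v : Int)
      = (xs.count v : Int) - (if xs[j] = v then 1 else 0) + (if w = v then 1 else 0) := by
  have := count_set_nat xs j w v h
  split_ifs at * <;> omega

-- the inner 'for bj in b' loop of B is a count
theorem innerB (b : List Int) (ai x t : Int) :
    b.foldl (fun t bj => if ai + bj = x then t + 1 else t) t = t + (b.count (x - ai) : Int) := by
  have hfun : (fun (t bj : Int) => if ai + bj = x then t + 1 else t)
      = (fun (t bj : Int) => if (fun bj => bj == x - ai) bj = true then t + 1 else t) := by
    funext t bj
    by_cases h : ai + bj = x
    · simp [show bj = x - ai by omega]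
    · simp [h, show ¬ bj = x - ai by omega]
  rw [hfun, PySem.List.foldl_count_if]
  rfl

-- weighting the distinct values by their multiplicities is summing over the list
theorem sum_ofList_count (a : List Int) (f : Int → Int) :
    ((PySem.Set.ofList a).map (fun k => ((a.count k : Int)) * f k)).sum = (a.map f).sum := by
  rw [Finset.sum_list_map_count a f]
  rw [← List.sum_toFinset _ (PySem.Set.nodup_ofList a)]
  have hfs : (PySem.Set.ofList a).toFinset = a.toFinset := by
    ext y; simp [PySem.Set.mem_ofList]
  rw [hfs]
  exact Finset.sum_congr rfl (fun m _ => by simp)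

-- A's count-query answer via its Counter equals B's nested pair count
theorem total_eq (a b : List Int) (bc : PySem.Dict Int Int) (x : Int)
    (hbc : ∀ v, bc.getD v 0 = (b.count v : Int)) :
    (PySem.Dict.counter a).items.foldl (fun t p => t + p.2 * bc.getD (x - p.1) 0) 0
      = a.foldl (fun t ai => b.foldl (fun t bj => if ai + bj = x then t + 1 else t) t) 0 := by
  rw [PySem.Dict.items_counter]
  rw [PySem.List.foldl_add ((PySem.Set.ofList a).map (fun k => (k, ((a.count k : Nat) : Int))))
        (fun p => p.2 * bc.getD (x - p.1) 0) 0]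
  simp only [innerB, hbc]
  rw [PySem.List.foldl_add a (fun ai => ((b.count (x - ai) : Nat) : Int)) 0]
  rw [List.map_map]
  have := sum_ofList_count a (fun k => (b.count (x - k) : Int))
  simp only [Function.comp_def] at *
  omega

-- the loop invariant: A's b_counter counts the current b, both b's agree, both results agree
def StRel (sA : PySem.Dict Int Int × List Int × List Int) (sB : List Int × List Int) : Prop :=
  (∀ v, sA.1.getD v 0 = (sA.2.1.count v : Int)) ∧ sA.2.1 = sB.1 ∧ sA.2.2 = sB.2

theorem step_rel (a : List Int) (q : List Int) (sA : PySem.Dict Int Int × List Int × List Int)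
    (sB : List Int × List Int) (h : StRel sA sB) :
    StRel (stepA (PySem.Dict.counter a) sA q) (stepB a sB q) := by
  obtain ⟨hbc, hb, hr⟩ := h
  obtain ⟨bc, bA, res⟩ := sA
  obtain ⟨bB, res'⟩ := sB
  simp only at hbc hb hr
  subst hb hr
  by_cases h0 : PySem.List.pyGetD q 0 0 = 0
  · -- update branch
    simp only [stepA, stepB, h0, if_pos]
    set i := PySem.List.pyGetD q 1 0 with hi
    set x := PySem.List.pyGetD q 2 0 with hx2
    set oldv := PySem.List.pyGetD bA i 0 with hold
    have hbc2 : ∀ u, (if (bc.modify oldv 0 (· - 1)).getD oldv 0 = 0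
          then (bc.modify oldv 0 (· - 1)).erase oldv
          else bc.modify oldv 0 (· - 1)).getD u 0 = (bc.modify oldv 0 (· - 1)).getD u 0 := by
      intro u
      split_ifs with hz
      · rw [getD0_erase]
        split_ifs with huo
        · rw [huo, hz]
        · rfl
      · rfl
    refine ⟨?_, ?_, rfl⟩
    · -- counter invariant after the update
      intro v
      by_cases hir : PySem.Raise.InRange bA.length i
      · obtain ⟨j, hj, hjlt⟩ := pyIdx?_of_inRange bA.length i hir
        have holdv : oldv = bA[j] := by
          simp [hold, PySem.List.pyGetD, PySem.List.pyGet?, hj, hjlt]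
        have hset : PySem.List.pySetD bA i (oldv + x) = bA.set j (oldv + x) := by
          simp [PySem.List.pySetD, PySem.List.pySet?, hj]
        have hnew : PySem.List.pyGetD (PySem.List.pySetD bA i (oldv + x)) i 0 = oldv + x := by
          rw [hset]
          simp [PySem.List.pyGetD, PySem.List.pyGet?, hj, hjlt]
        rw [hnew, hset, count_set_int bA j (oldv + x) v hjlt]
        dsimp only
        rw [PySem.Dict.getD_modify]
        simp only [hbc2]
        simp only [PySem.Dict.getD_modify, hbc]
        simp only [holdv]
        have hpos : 0 < List.count bA[j] bA := List.count_pos_iff.mpr (List.getElem_mem hjlt)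
        rcases eq_or_ne x 0 with hx0 | hx0
        · simp only [hx0, add_zero]
          split_ifs <;> (try subst_vars) <;> omega
        · split_ifs <;> (try subst_vars) <;> omega
      · -- index out of range: the total forms leave b unchanged either way
        have hnone : PySem.List.pyIdx? bA.length i = none := pyIdx?_of_not_inRange _ _ hir
        have h1 : PySem.List.pySetD bA i (oldv + x) = bA := by
          simp [PySem.List.pySetD, PySem.List.pySet?, hnone]
        have h2 : oldv = 0 := by
          simp [hold, PySem.List.pyGetD, PySem.List.pyGet?, hnone]
        have h3 : PySem.List.pyGetD bA i 0 = 0 := by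
          simp [PySem.List.pyGetD, PySem.List.pyGet?, hnone]
        rw [h1, h3]
        dsimp only
        rw [PySem.Dict.getD_modify]
        simp only [hbc2]
        simp only [PySem.Dict.getD_modify, hbc]
        simp only [h2]
        split_ifs <;> (try subst_vars) <;> omega
    · -- the two b updates agree
      rfl
  · by_cases h1 : PySem.List.pyGetD q 0 0 = 1
    · simp only [stepA, stepB, if_neg h0, if_pos h1]
      exact ⟨hbc, rfl, by dsimp only; rw [total_eq a bA bc _ hbc]⟩
    · simp only [stepA, stepB, if_neg h0, if_neg h1]
      exact ⟨hbc, rfl, rfl⟩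

theorem loop_rel (a : List Int) (qs : List (List Int)) :
    ∀ (sA : PySem.Dict Int Int × List Int × List Int) (sB : List Int × List Int), StRel sA sB →
      StRel (qs.foldl (stepA (PySem.Dict.counter a)) sA) (qs.foldl (stepB a) sB) := by
  induction qs with
  | nil => intro sA sB h; exact h
  | cons q t ih => intro sA sB h; exact ih _ _ (step_rel a q sA sB h)

-- ===== VERDICT (by name: the statement is the Claim_ definition above) =====
theorem solution_spec : Claim_equal_solution := by
  intro a b queries _ _
  unfold Spec_solution solution solution_alt
  have h := loop_rel a queries (PySem.Dict.counter b, b, ([] : List Int)) (b, ([] : List Int))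
    ⟨fun v => PySem.Dict.getD_counter b v, rfl, rfl⟩
  exact h.2.2
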